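-- pv_equiv track=rewrite | github.com/IndenScale/Kosmos | tests/parser/pdf_parser_test.py | _determine_chunk_pages
-- ===== SOURCE A (Python) =====
-- from typing import List, Dict, Any, Optional, Tuple
--
-- def _determine_chunk_pages(chunk: str, page_ranges: List[Tuple[int, int, int]], text_content: str) -> Tuple[Optional[int], Optional[int]]:
--     """
--     确定文本块的页面范围
--     返回: (page_start, page_end)
--     """
--     if not page_ranges:
--         # 如果没有页面信息，默认返回第一页
--         return (1, 1)
--
--     # 找到chunk在text_content中的位置
--     chunk_start = text_content.find(chunk)
--     if chunk_start == -1: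
--         # 如果找不到chunk，默认返回第一页
--         return (1, 1)
--
--     chunk_end = chunk_start + len(chunk)
--
--     # 确定起始页
--     page_start = None
--     for start_pos, end_pos, page_num in page_ranges:
--         if start_pos <= chunk_start < end_pos:
--             page_start = page_num
--             break
--
--     # 确定结束页
--     page_end = None
--     for start_pos, end_pos, page_num in page_ranges:
--         if start_pos < chunk_end <= end_pos:
--             page_end = page_num
--             break
--
--     # 如果没有找到结束页，使用最后一个页面
--     if page_end is None and page_ranges:
--         page_end = page_ranges[-1][2]
--
--     # 如果没有找到起始页，使用第一页
--     if page_start is None and page_ranges: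
--         page_start = page_ranges[0][2]
--
--     return (page_start, page_end)
-- ===== SOURCE B (Python) =====
-- def _determine_chunk_pages(chunk, page_ranges, text_content):
--     # Reverse-fold formulation: no None sentinels, no break. Preload the
--     # fallback pages as initial values and sweep page_ranges BACK-TO-FRONT,
--     # overwriting on each match; the last overwrite (the earliest range in
--     # forward order) wins, reproducing A's first-match-wins semantics.
--     if not page_ranges:
--         return (1, 1)
--     chunk_start = text_content.find(chunk)
--     if chunk_start == -1:
--         return (1, 1)
--     chunk_end = chunk_start + len(chunk)
--     page_start = page_ranges[0][2]
--     page_end = page_ranges[-1][2]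
--     for start_pos, end_pos, page_num in reversed(page_ranges):
--         if start_pos <= chunk_start < end_pos:
--             page_start = page_num
--         if start_pos < chunk_end <= end_pos:
--             page_end = page_num
--     return (page_start, page_end)
-- ===== Notes on version B (the rewrite author's own statement) =====
-- stated objective: alternative
-- what changed: Replaces A's two forward first-match scans with Option/None tracking, break, and post-hoc fallbacks by a single backward overwrite fold: fallback pages are preloaded as initial values and page_ranges is swept in reverse, each match overwriting, so the earliest forward match wins with no sentinels or early exit.
import Mathlib
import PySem

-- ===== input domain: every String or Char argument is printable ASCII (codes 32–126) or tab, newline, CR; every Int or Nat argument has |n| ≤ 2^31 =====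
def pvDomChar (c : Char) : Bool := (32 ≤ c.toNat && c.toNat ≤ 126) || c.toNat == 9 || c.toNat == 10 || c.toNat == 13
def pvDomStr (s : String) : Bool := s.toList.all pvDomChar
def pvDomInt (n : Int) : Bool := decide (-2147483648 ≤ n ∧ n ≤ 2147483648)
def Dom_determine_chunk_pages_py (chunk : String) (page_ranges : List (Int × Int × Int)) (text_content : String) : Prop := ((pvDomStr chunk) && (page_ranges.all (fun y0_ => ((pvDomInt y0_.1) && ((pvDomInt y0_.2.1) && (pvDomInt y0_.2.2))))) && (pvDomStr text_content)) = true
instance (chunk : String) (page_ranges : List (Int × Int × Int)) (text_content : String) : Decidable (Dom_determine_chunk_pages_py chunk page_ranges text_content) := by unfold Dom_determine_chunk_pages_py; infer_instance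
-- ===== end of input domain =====

-- B replaces A's two forward None-tracking scans + fallbacks by one backward overwrite fold over reversed(page_ranges) with fallbacks preloaded (alternative decomposition; same cost).


-- ===== PORT A =====
-- first range with start_pos <= chunk_start < end_pos (A's first loop, with break)
def pvScanStart (page_ranges : List (Int × Int × Int)) (chunk_start : Int) : Option Int :=
  match page_ranges with
  | [] => none
  | (start_pos, end_pos, page_num) :: rest =>
      if start_pos ≤ chunk_start ∧ chunk_start < end_pos then some page_num
      else pvScanStart rest chunk_start

-- first range with start_pos < chunk_end <= end_pos (A's second loop, with break)
def pvScanEnd (page_ranges : List (Int × Int × Int)) (chunk_end : Int) : Option Int :=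
  match page_ranges with
  | [] => none
  | (start_pos, end_pos, page_num) :: rest =>
      if start_pos < chunk_end ∧ chunk_end ≤ end_pos then some page_num
      else pvScanEnd rest chunk_end

def determine_chunk_pages_py (chunk : String) (page_ranges : List (Int × Int × Int)) (text_content : String) : Option Int × Option Int :=
  if page_ranges = [] then (some 1, some 1)
  else
    let chunk_start := PySem.Str.find text_content chunk
    if chunk_start = -1 then (some 1, some 1)
    else
      let chunk_end := chunk_start + (PySem.Str.len chunk : Int)
      let page_start := pvScanStart page_ranges chunk_start
      let page_end := pvScanEnd page_ranges chunk_end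
      let page_end := match page_end with
        | none => some ((page_ranges.getLastD (0,0,0)).2.2)
        | some p => some p
      let page_start := match page_start with
        | none => some ((page_ranges.headD (0,0,0)).2.2)
        | some p => some p
      (page_start, page_end)

-- ===== PORT B =====
-- B's backward overwrite fold: loop over reversed(page_ranges), overwrite on match
def pvBackStep (chunk_start chunk_end : Int) (st : Int × Int) (r : Int × Int × Int) : Int × Int :=
  let (start_pos, end_pos, page_num) := r
  ((if start_pos ≤ chunk_start ∧ chunk_start < end_pos then page_num else st.1),
   (if start_pos < chunk_end ∧ chunk_end ≤ end_pos then page_num else st.2))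

def determine_chunk_pages_py_alt (chunk : String) (page_ranges : List (Int × Int × Int)) (text_content : String) : Option Int × Option Int :=
  if page_ranges = [] then (some 1, some 1)
  else
    let chunk_start := PySem.Str.find text_content chunk
    if chunk_start = -1 then (some 1, some 1)
    else
      let chunk_end := chunk_start + (PySem.Str.len chunk : Int)
      let init : Int × Int := ((page_ranges.headD (0,0,0)).2.2, (page_ranges.getLastD (0,0,0)).2.2)
      let (page_start, page_end) :=
        page_ranges.reverse.foldl (pvBackStep chunk_start chunk_end) init
      (some page_start, some page_end)

-- ===== PRECONDITION & SPEC =====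
def Spec_determine_chunk_pages_py (chunk : String) (page_ranges : List (Int × Int × Int)) (text_content : String) (out : Option Int × Option Int) : Prop := out = determine_chunk_pages_py_alt chunk page_ranges text_content
instance (chunk : String) (page_ranges : List (Int × Int × Int)) (text_content : String) (out : Option Int × Option Int) : Decidable (Spec_determine_chunk_pages_py chunk page_ranges text_content out) := by unfold Spec_determine_chunk_pages_py; infer_instance

-- ===== CLAIM (what is proved, stated in full; the proofs are below) =====
def Claim_equal_determine_chunk_pages_py : Prop := ∀ (chunk : String) (page_ranges : List (Int × Int × Int)) (text_content : String), Dom_determine_chunk_pages_py chunk page_ranges text_content → Spec_determine_chunk_pages_py chunk page_ranges text_content (determine_chunk_pages_py chunk page_ranges text_content)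

-- ===== LEMMAS AND PROOFS =====
-- The backward overwrite fold equals the pair of forward first-match scans with defaults.
theorem pvBackFold_eq (rs : List (Int × Int × Int)) (cs ce : Int) (d : Int × Int) :
    rs.reverse.foldl (pvBackStep cs ce) d =
      ((pvScanStart rs cs).getD d.1, (pvScanEnd rs ce).getD d.2) := by
  rw [List.foldl_reverse]
  induction rs with
  | nil => simp [pvScanStart, pvScanEnd]
  | cons hd tl ih =>
    obtain ⟨s, e, p⟩ := hd
    rw [List.foldr_cons, ih]
    simp only [pvBackStep, pvScanStart, pvScanEnd]
    split_ifs <;> simp_all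

-- ===== VERDICT (by name: the statement is the Claim_ definition above) =====
theorem determine_chunk_pages_py_spec : Claim_equal_determine_chunk_pages_py := by
  intro chunk page_ranges text_content _
  unfold Spec_determine_chunk_pages_py determine_chunk_pages_py determine_chunk_pages_py_alt
  simp only [pvBackFold_eq]
  cases hs : pvScanStart page_ranges (PySem.Str.find text_content chunk) <;>
  cases he : pvScanEnd page_ranges (PySem.Str.find text_content chunk + (PySem.Str.len chunk : Int)) <;>
  simp
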